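-- pv_equiv track=rewrite | github.com/joshcwainwright/GeorgiaTechCoursework | CS1301/HW09.py | pickyEater
-- ===== SOURCE A (Python) =====
-- def pickyEater(lst):
--     if lst==[]:
--         return 0
--     else:
--         if len(lst[0])%2==0 and lst[0]!='':
--             return 1+pickyEater(lst[1:])
--         else:
--             return 0+pickyEater(lst[1:])
-- ===== SOURCE B (Python) =====
-- def pickyEater(lst):
--     count = 0
--     for s in lst:
--         if s != '' and len(s) % 2 == 0:
--             count += 1
--     return count
-- ===== Notes on version B (the rewrite author's own statement) =====
-- stated objective: faster
-- what changed: Replaces head/tail recursion with repeated lst[1:] slicing by a single iterative pass with a count accumulator.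
import Mathlib
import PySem

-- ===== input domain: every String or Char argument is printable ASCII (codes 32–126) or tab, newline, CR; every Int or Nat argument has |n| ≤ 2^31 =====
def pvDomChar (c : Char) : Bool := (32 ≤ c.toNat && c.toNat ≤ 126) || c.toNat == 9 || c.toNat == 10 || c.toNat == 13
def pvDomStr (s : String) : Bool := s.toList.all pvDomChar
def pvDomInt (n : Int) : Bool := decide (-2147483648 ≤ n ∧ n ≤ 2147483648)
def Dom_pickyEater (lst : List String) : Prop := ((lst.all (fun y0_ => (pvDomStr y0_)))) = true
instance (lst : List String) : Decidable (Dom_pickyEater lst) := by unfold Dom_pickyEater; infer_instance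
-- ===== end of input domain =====

-- B replaces A's head/tail recursion (with list slicing) by one iterative pass with a count accumulator; objective: simpler.

-- ===== PORT A =====
-- literal transliteration of A: recursion on the list, slicing off the head
def pickyEater (lst : List String) : Int :=
  match lst with
  | [] => 0
  | x :: rest =>
      if PySem.Int.mod (PySem.Str.len x) 2 = 0 ∧ x ≠ "" then
        1 + pickyEater rest
      else
        0 + pickyEater rest

-- ===== PORT B =====
-- literal transliteration of B: fold over the list with a running count
def pickyEater_alt (lst : List String) : Int :=
  lst.foldl (fun count s =>
    if s ≠ "" ∧ PySem.Int.mod (PySem.Str.len s) 2 = 0 then count + 1 else count) 0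

-- ===== PRECONDITION & SPEC =====
def Spec_pickyEater (lst : List String) (out : Int) : Prop := out = pickyEater_alt lst
instance (lst : List String) (out : Int) : Decidable (Spec_pickyEater lst out) := by unfold Spec_pickyEater; infer_instance

-- ===== CLAIM (what is proved, stated in full; the proofs are below) =====
def Claim_equal_pickyEater : Prop := ∀ (lst : List String), Dom_pickyEater lst → Spec_pickyEater lst (pickyEater lst)

-- ===== LEMMAS AND PROOFS =====
lemma pickyEater_alt_shift (lst : List String) (c : Int) :
    lst.foldl (fun count s =>
      if s ≠ "" ∧ PySem.Int.mod (PySem.Str.len s) 2 = 0 then count + 1 else count) c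
    = c + pickyEater_alt lst := by
  induction lst generalizing c with
  | nil => simp [pickyEater_alt]
  | cons x rest ih =>
      simp only [pickyEater_alt, List.foldl_cons]
      rw [ih, ih]
      split_ifs <;> ring

lemma pickyEater_eq (lst : List String) : pickyEater lst = pickyEater_alt lst := by
  induction lst with
  | nil => simp [pickyEater, pickyEater_alt]
  | cons x rest ih =>
      simp only [pickyEater, pickyEater_alt, List.foldl_cons]
      rw [pickyEater_alt_shift, ih]
      split_ifs with h1 h2 h3
      · ring
      · exact absurd ⟨h1.2, h1.1⟩ h2
      · exact absurd ⟨h3.2, h3.1⟩ h1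
      · ring

-- ===== VERDICT (by name: the statement is the Claim_ definition above) =====
theorem pickyEater_spec : Claim_equal_pickyEater := by
  intro lst _
  unfold Spec_pickyEater
  exact pickyEater_eq lst
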